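-- pv_equiv track=rewrite | github.com/nordcap/barzas | barzas/transport/lib.py | calc_trip_adv
-- ===== SOURCE A (Python) =====
-- def calc_trip_adv(dict_move):
--     dict_auto = dict()
--     for key_tonar in dict_move:
--         dict_auto[key_tonar] = dict()
--         for key_date in dict_move[key_tonar]:
--             list_zone = list(set(dict_move[key_tonar][key_date]))
--             list_zone.sort()
--             dict_auto[key_tonar][key_date] = dict()
--             for zone in list_zone:
--                 count_zone = dict_move[key_tonar][key_date].count(zone)  # кол-во ходок
--                 dict_auto[key_tonar][key_date][zone] = count_zone
--     return dict_auto
-- ===== SOURCE B (Python) =====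
-- def zone_counts(zones):
--     counts = {}
--     for zone in sorted(zones):
--         counts[zone] = counts.get(zone, 0) + 1
--     return counts
--
--
-- def calc_trip_adv(dict_move):
--     return {vehicle: {date: zone_counts(zones) for date, zones in by_date.items()}
--             for vehicle, by_date in dict_move.items()}
-- ===== Notes on version B (the rewrite author's own statement) =====
-- stated objective: alternative
-- what changed: replaces the inner set+sort+per-zone .count rescans with one sort of the date's zone list followed by a single counting pass over it (dict counter on the sorted list), and builds the nested result with dict comprehensions
import Mathlib
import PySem

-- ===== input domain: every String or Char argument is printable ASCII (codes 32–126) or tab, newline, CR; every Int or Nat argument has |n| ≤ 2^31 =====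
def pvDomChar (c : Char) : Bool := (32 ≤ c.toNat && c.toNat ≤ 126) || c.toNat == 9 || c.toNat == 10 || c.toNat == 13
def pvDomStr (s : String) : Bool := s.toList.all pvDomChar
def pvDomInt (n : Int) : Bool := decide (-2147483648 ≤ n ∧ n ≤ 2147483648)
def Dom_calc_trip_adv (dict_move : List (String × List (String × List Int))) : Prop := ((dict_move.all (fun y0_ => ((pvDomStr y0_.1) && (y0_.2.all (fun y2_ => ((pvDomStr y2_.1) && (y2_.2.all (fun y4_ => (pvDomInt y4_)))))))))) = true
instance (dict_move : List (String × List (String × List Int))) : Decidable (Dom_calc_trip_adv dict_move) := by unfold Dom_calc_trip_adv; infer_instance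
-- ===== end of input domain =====

-- ===== PORT A =====
-- B replaces the inner set+sort+per-zone .count rescans of A with one sort and a single
-- counting pass over it (objective: alternative algorithm for the per-date counting).
-- Port of A: nested dicts built by insertion; per date, list(set(zones)) sorted, then
-- one .count scan per distinct zone.
def calc_trip_adv (dict_move : List (String × List (String × List Int))) : List (String × List (String × List (Int × Int))) :=
  (dict_move.foldl
    (fun (dict_auto : PySem.Dict String (List (String × List (Int × Int)))) kv =>
      dict_auto.insert kv.1
        ((kv.2.foldl
          (fun (d_dates : PySem.Dict String (List (Int × Int))) dz =>
            let list_zone := PySem.List.sorted (PySem.Set.ofList dz.2) (fun z => z) false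
            d_dates.insert dz.1
              ((list_zone.foldl
                (fun (d_zone : PySem.Dict Int Int) zone =>
                  d_zone.insert zone ((PySem.List.count dz.2 zone : Int)))
                PySem.Dict.empty).items))
          PySem.Dict.empty).items))
    PySem.Dict.empty).items

-- ===== PORT B =====
-- helper zone_counts: one counting pass over the sorted zone list
def zone_counts (zones : List Int) : List (Int × Int) :=
  ((PySem.List.sorted zones (fun z => z) false).foldl
    (fun (counts : PySem.Dict Int Int) zone => counts.insert zone (counts.getD zone 0 + 1))
    PySem.Dict.empty).items

def calc_trip_adv_alt (dict_move : List (String × List (String × List Int))) : List (String × List (String × List (Int × Int))) :=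
  dict_move.map (fun kv => (kv.1, kv.2.map (fun dz => (dz.1, zone_counts dz.2))))

-- ===== PRECONDITION & SPEC =====
-- Pre_ excludes association lists with duplicate vehicle keys or duplicate date keys, which do
-- not represent any Python dict input (A's dict-overwrite order there is accidental).
def Pre_calc_trip_adv (dict_move : List (String × List (String × List Int))) : Prop :=
  (dict_move.map (fun kv => kv.1)).Nodup ∧
  ∀ kv ∈ dict_move, (kv.2.map (fun dz => dz.1)).Nodup
instance (dict_move : List (String × List (String × List Int))) : Decidable (Pre_calc_trip_adv dict_move) := by unfold Pre_calc_trip_adv; infer_instance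
def pvWitness_calc_trip_adv : (List (String × List (String × List Int))) :=
  [("t1", [("2020-01-01", [1, 2, 1]), ("2020-01-02", [])]), ("t2", [])]
def Spec_calc_trip_adv (dict_move : List (String × List (String × List Int))) (out : List (String × List (String × List (Int × Int)))) : Prop := out = calc_trip_adv_alt dict_move
instance (dict_move : List (String × List (String × List Int))) (out : List (String × List (String × List (Int × Int)))) : Decidable (Spec_calc_trip_adv dict_move out) := by unfold Spec_calc_trip_adv; infer_instance

-- ===== CLAIM (what is proved, stated in full; the proofs are below) =====
def Claim_equal_calc_trip_adv : Prop := ∀ (dict_move : List (String × List (String × List Int))), Dom_calc_trip_adv dict_move → Pre_calc_trip_adv dict_move → Spec_calc_trip_adv dict_move (calc_trip_adv dict_move)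

-- ===== LEMMAS AND PROOFS =====

-- Set.ofList is a sublist of its argument (first occurrences in order).
theorem pv_ofList_sublist {α : Type} [BEq α] (xs : List α) : (PySem.Set.ofList xs).Sublist xs := by
  rw [PySem.Set.ofList_eq_foldl]
  have h : ∀ (l : List α) (acc t : List α), acc.Sublist t → (l.foldl PySem.Set.add acc).Sublist (t ++ l) := by
    intro l
    induction l with
    | nil => intro acc t h; simpa using h
    | cons x l ih =>
      intro acc t h
      have h2 : (PySem.Set.add acc x).Sublist (t ++ [x]) := by
        unfold PySem.Set.add
        split
        · exact h.trans (List.sublist_append_left t [x])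
        · exact List.Sublist.append h (List.Sublist.refl [x])
      simpa [List.append_assoc] using ih (PySem.Set.add acc x) (t ++ [x]) h2
  simpa using h xs [] [] (List.Sublist.refl [])

-- sorted(set(xs)) = set(sorted(xs)) for Int lists (both are the strictly increasing
-- enumeration of the distinct elements).
theorem pv_sorted_ofList_comm (xs : List Int) :
    PySem.List.sorted (PySem.Set.ofList xs) (fun z => z) false
      = PySem.Set.ofList (PySem.List.sorted xs (fun z => z) false) := by
  apply PySem.List.sorted_eq_of_perm_of_pairwise_lt
  · rw [List.perm_ext_iff_of_nodup (PySem.Set.nodup_ofList _) (PySem.Set.nodup_ofList _)]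
    intro a
    simp [PySem.Set.mem_ofList, PySem.List.mem_sorted]
  · have hsub := pv_ofList_sublist (PySem.List.sorted xs (fun z => z) false)
    have hle : (PySem.Set.ofList (PySem.List.sorted xs (fun z => z) false)).Pairwise (fun a b => a ≤ b) :=
      (PySem.List.sorted_pairwise xs (fun z => z)).sublist hsub
    have hnd : (PySem.Set.ofList (PySem.List.sorted xs (fun z => z) false)).Pairwise (fun a b => a ≠ b) :=
      PySem.Set.nodup_ofList _
    exact (hle.and hnd).imp (fun h => lt_of_le_of_ne h.1 h.2)

-- folding insert over a list with nodup keys from the empty dict yields the item list directly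
theorem pv_foldl_insert_items {κ α β : Type} [BEq κ] [LawfulBEq κ] (k : α → κ) (f : α → β)
    (l : List α) (hnd : (l.map k).Nodup) :
    (l.foldl (fun (d : PySem.Dict κ β) x => d.insert (k x) (f x)) PySem.Dict.empty).items
      = l.map (fun x => (k x, f x)) := by
  have h : ∀ (l : List α) (d : PySem.Dict κ β), (l.map k).Nodup →
      (∀ x ∈ l, d.contains (k x) = false) →
      (l.foldl (fun (d : PySem.Dict κ β) x => d.insert (k x) (f x)) d).items
        = d.items ++ l.map (fun x => (k x, f x)) := by
    intro l
    induction l with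
    | nil => intro d _ _; simp
    | cons x l ih =>
      intro d hnd hdis
      have hx : d.contains (k x) = false := hdis x (by simp)
      have hins : (d.insert (k x) (f x)).items = d.items ++ [(k x, f x)] := by
        unfold PySem.Dict.insert
        rw [hx]
        simp
      simp only [List.map_cons, List.nodup_cons] at hnd
      have hdis2 : ∀ y ∈ l, (d.insert (k x) (f x)).contains (k y) = false := by
        intro y hy
        have hyx : (k x == k y) = false := by
          simp only [beq_eq_false_iff_ne]
          intro he
          exact hnd.1 (he ▸ List.mem_map_of_mem hy)
        have hcon : (d.insert (k x) (f x)).contains (k y)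
            = (d.items ++ [(k x, f x)]).any (fun p => p.1 == k y) := by
          simp [PySem.Dict.contains, hins]
        have hold := hdis y (by simp [hy])
        simp only [PySem.Dict.contains] at hold
        simp [hcon, List.any_append, hold, hyx]
      rw [List.foldl_cons, ih _ hnd.2 hdis2, hins]
      simp
  simpa using h l PySem.Dict.empty hnd (by intro x _; rfl)

-- the per-date inner dicts agree
theorem pv_inner_eq (zones : List Int) :
    ((PySem.List.sorted (PySem.Set.ofList zones) (fun z => z) false).foldl
      (fun (d : PySem.Dict Int Int) zone => d.insert zone ((PySem.List.count zones zone : Int)))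
      PySem.Dict.empty).items = zone_counts zones := by
  have hnd : (PySem.List.sorted (PySem.Set.ofList zones) (fun z => z) false).Nodup :=
    (PySem.List.sorted_perm _ _ _).nodup_iff.mpr (PySem.Set.nodup_ofList _)
  rw [pv_foldl_insert_items (fun z => z) _ _ (by simpa using hnd)]
  unfold zone_counts
  rw [PySem.Dict.foldl_insert_getD_add_one_eq_counter, PySem.Dict.items_counter,
    pv_sorted_ofList_comm]
  apply List.map_congr_left
  intro z _
  have hc := ((PySem.List.sorted_perm zones (fun z => z) false).count_eq z).symm
  simp [PySem.List.count, hc]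

-- ===== VERDICT (by name: the statement is the Claim_ definition above) =====
theorem calc_trip_adv_spec : Claim_equal_calc_trip_adv := by
  intro dict_move _ hpre
  unfold Spec_calc_trip_adv calc_trip_adv calc_trip_adv_alt
  obtain ⟨hnd1, hnd2⟩ := hpre
  refine (pv_foldl_insert_items (fun kv => kv.1) _ dict_move hnd1).trans ?_
  apply List.map_congr_left
  intro kv hkv
  refine congrArg (fun t => (kv.1, t)) ?_
  refine (pv_foldl_insert_items (fun dz => dz.1) _ kv.2 (hnd2 kv hkv)).trans ?_
  apply List.map_congr_left
  intro dz _
  exact congrArg (fun t => (dz.1, t)) (pv_inner_eq dz.2)
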